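-- pv_equiv track=rewrite | github.com/dannyp0930/algorithm | baekjoon/16120_PPAP.py | solution
-- ===== SOURCE A (Python) =====
-- def solution(string):
--     stack = []
--     i = 0
--     for i in range(len(string)):
--         stack.append(string[i])
--         if stack[-4:] == list('PPAP'):
--             for _ in range(3):
--                 stack.pop()
--     if stack == ['P', 'P', 'A', 'P'] or stack == ['P']:
--         return 'PPAP'
--     return 'NP'
-- ===== SOURCE B (Python) =====
-- def solution(string):
--     s = string
--     while 'PPAP' in s:
--         s = s.replace('PPAP', 'P')
--     return 'PPAP' if s == 'P' else 'NP'
-- ===== Notes on version B (the rewrite author's own statement) =====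
-- stated objective: simpler
-- what changed: Replaces the one-pass character stack with repeated whole-string rewriting (s = s.replace('PPAP','P') until no occurrence remains) and accepts iff the fixpoint is 'P'; no stack or per-character Python bookkeeping, each pass is one C-level str.replace.
import Mathlib
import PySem

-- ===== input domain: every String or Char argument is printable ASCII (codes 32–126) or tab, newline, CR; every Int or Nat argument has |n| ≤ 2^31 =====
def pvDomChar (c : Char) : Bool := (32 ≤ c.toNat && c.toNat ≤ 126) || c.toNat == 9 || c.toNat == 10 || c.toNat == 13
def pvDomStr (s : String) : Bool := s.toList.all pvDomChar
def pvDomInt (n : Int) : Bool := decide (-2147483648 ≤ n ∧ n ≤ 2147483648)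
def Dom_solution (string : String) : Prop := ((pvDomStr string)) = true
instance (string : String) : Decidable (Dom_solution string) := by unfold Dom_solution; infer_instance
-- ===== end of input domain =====

-- B replaces A's one-pass character stack by repeated whole-string rewriting of 'PPAP' to 'P'
-- until a fixpoint, accepting iff the fixpoint is 'P' (objective: simpler, no stack bookkeeping).

-- ===== PORT A =====
-- the body of A's for-loop: push string[i], then pop three times if the top four are P,P,A,P
def pyStep (stack : List Char) (c : Char) : List Char :=
  let stack := stack ++ [c]
  if PySem.List.slice stack (some (-4)) none = ['P', 'P', 'A', 'P'] then
    -- for _ in range(3): stack.pop()  (pop() never raises here: the stack has ≥ 4 elements)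
    (PySem.List.pyRange 0 3 1).foldl
      (fun st _ => ((PySem.List.pop? st).map Prod.snd).getD st) stack
  else stack

def solution (string : String) : String :=
  let stack := (PySem.List.pyRange 0 (PySem.Str.len string) 1).foldl
      (fun stack i => pyStep stack (PySem.List.pyGetD string.toList i ' ')) []
  if stack = ['P', 'P', 'A', 'P'] ∨ stack = ['P'] then "PPAP" else "NP"

-- ===== PORT B =====
-- structural form of one pass of s.replace('PPAP','P'); used to prove the while-loop terminates
def repl (l : List Char) : List Char :=
  match l with
  | [] => []
  | c :: t =>
    if ['P','P','A','P'].isPrefixOf (c :: t) then 'P' :: repl (t.drop 3)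
    else c :: repl t
termination_by l.length
decreasing_by
  · simp
  · simp

theorem go_spec (fuel : Nat) (l acc : List Char) (h : l.length ≤ fuel) :
    PySem.Chars.replace.go ['P','P','A','P'] ['P'] fuel l acc = acc.reverse ++ repl l := by
  induction fuel generalizing l acc with
  | zero =>
    have : l = [] := by cases l <;> simp_all
    subst this
    simp [PySem.Chars.replace.go, repl]
  | succ n ih =>
    cases l with
    | nil => simp [PySem.Chars.replace.go, repl]
    | cons c t =>
      rw [PySem.Chars.replace.go]
      rw [repl]
      by_cases hp : ['P','P','A','P'].isPrefixOf (c :: t)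
      · simp only [hp, if_true]
        rw [ih]
        · simp
        · simp at h ⊢; omega
      · simp only [hp]
        rw [ih t (c :: acc) (by simp at h ⊢; omega)]
        simp

theorem replace_eq_repl (l : List Char) :
    PySem.Chars.replace l ['P','P','A','P'] ['P'] = repl l := by
  rw [PySem.Chars.replace]
  simp [go_spec l.length l [] le_rfl]

theorem replace_toList (s : String) :
    (PySem.Str.replace s "PPAP" "P").toList = repl s.toList := by
  rw [PySem.Str.toList_replace]
  rw [show ("PPAP" : String).toList = ['P','P','A','P'] from rfl,
      show ("P" : String).toList = ['P'] from rfl]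
  exact replace_eq_repl _

theorem repl_length_le (l : List Char) : (repl l).length ≤ l.length := by
  induction l using repl.induct with
  | case1 => simp [repl]
  | case2 c t hp ih =>
    rw [repl, if_pos hp]
    simp only [List.length_cons]
    simp [List.length_drop] at ih
    omega
  | case3 c t hp ih =>
    rw [repl, if_neg hp]
    simp
    omega

theorem repl_length_lt (l : List Char) (h : ['P','P','A','P'] <:+: l) :
    (repl l).length < l.length := by
  induction l using repl.induct with
  | case1 => simp at h
  | case2 c t hp ih =>
    rw [repl, if_pos hp]
    rw [List.isPrefixOf_iff_prefix] at hp
    obtain ⟨u, hu⟩ := hp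
    have hlen : t.length = u.length + 3 := by
      have := congrArg List.length hu
      simp at this
      omega
    have := repl_length_le (t.drop 3)
    simp [List.length_drop] at this ⊢
    omega
  | case3 c t hp ih =>
    rw [repl, if_neg hp]
    have ht : ['P','P','A','P'] <:+: t := by
      rcases (List.infix_cons_iff).mp h with h1 | h2
      · exact absurd (List.isPrefixOf_iff_prefix.mpr h1) hp
      · exact h2
    simp only [List.length_cons]
    have := ih ht
    omega

theorem isIn_PPAP_infix (s : String) :
    PySem.Str.isIn "PPAP" s = true ↔ ['P','P','A','P'] <:+: s.toList := by
  rw [PySem.Str.isIn_iff_infix]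
  rfl

-- the while loop of B: s = s.replace('PPAP','P') while 'PPAP' in s
def altLoop (s : String) : String :=
  if h : PySem.Str.isIn "PPAP" s then altLoop (PySem.Str.replace s "PPAP" "P") else s
termination_by s.toList.length
decreasing_by
  rw [replace_toList]
  exact repl_length_lt _ ((isIn_PPAP_infix s).mp h)

def solution_alt (string : String) : String :=
  if altLoop string = "P" then "PPAP" else "NP"

-- ===== PRECONDITION & SPEC =====
def Spec_solution (string : String) (out : String) : Prop := out = solution_alt string
instance (string : String) (out : String) : Decidable (Spec_solution string out) := by unfold Spec_solution; infer_instance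

-- ===== CLAIM (what is proved, stated in full; the proofs are below) =====
def Claim_equal_solution : Prop := ∀ (string : String), Dom_solution string → Spec_solution string (solution string)

-- ===== LEMMAS AND PROOFS =====

-- the stack of A, maintained in reverse: one push with the PPAP-suffix reduction
def rstep (c : Char) (r : List Char) : List Char :=
  if c = 'P' ∧ r.take 3 = ['A','P','P'] then 'P' :: r.drop 3 else c :: r

def revRun (r : List Char) (l : List Char) : List Char :=
  l.foldl (fun r c => rstep c r) r

theorem revRun_cons (r : List Char) (c : Char) (l : List Char) :
    revRun r (c :: l) = revRun (rstep c r) l := rfl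

-- pushing P,P,A,P onto any reversed stack equals pushing a single P
theorem rstep4 (r : List Char) :
    rstep 'P' (rstep 'A' (rstep 'P' (rstep 'P' r))) = rstep 'P' r := by
  by_cases h : r.take 3 = ['A','P','P']
  · obtain ⟨t, rfl⟩ : ∃ t, r = 'A' :: 'P' :: 'P' :: t := by
      cases r with
      | nil => simp at h
      | cons a t =>
        cases t with
        | nil => simp at h
        | cons b t =>
          cases t with
          | nil => simp at h
          | cons d t =>
            simp at h
            exact ⟨t, by simp [h.1, h.2.1, h.2.2]⟩
    simp [rstep]
  · simp [rstep, h]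

-- one global replace pass does not change the stack the input drives A to
theorem revRun_repl (l : List Char) (r : List Char) :
    revRun r (repl l) = revRun r l := by
  induction l using repl.induct generalizing r with
  | case1 => rw [repl]
  | case2 c t hp ih =>
    obtain ⟨hc, t', ht⟩ : c = 'P' ∧ ∃ t', t = 'P' :: 'A' :: 'P' :: t' := by
      rw [List.isPrefixOf_iff_prefix] at hp
      obtain ⟨u, hu⟩ := hp
      injection hu with h1 h2
      exact ⟨h1.symm, u, h2.symm⟩
    subst hc; subst ht
    rw [repl, if_pos hp]
    simp only [List.drop_succ_cons, List.drop_zero] at ih ⊢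
    rw [revRun_cons, ih]
    rw [revRun_cons, revRun_cons, revRun_cons, revRun_cons, rstep4]
  | case3 c t hp ih =>
    rw [repl, if_neg hp]
    rw [revRun_cons, revRun_cons, ih]

-- A's loop body is rstep on the reversed stack
theorem pyStep_rev (st : List Char) (c : Char) :
    pyStep st c = (rstep c st.reverse).reverse := by
  unfold pyStep
  show (if PySem.List.slice (st ++ [c]) (some (-4)) = ['P', 'P', 'A', 'P'] then _ else _) = _
  rw [PySem.List.slice_from_neg_ofNat (st ++ [c]) 4 (by omega)]
  by_cases h : c = 'P' ∧ st.reverse.take 3 = ['A','P','P']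
  · obtain ⟨hc, ht⟩ := h
    subst hc
    obtain ⟨t, hrev⟩ : ∃ t, st.reverse = 'A' :: 'P' :: 'P' :: t := by
      have hsplit := List.take_append_drop 3 st.reverse
      rw [ht] at hsplit
      exact ⟨st.reverse.drop 3, hsplit.symm⟩
    have hst : st = t.reverse ++ ['P', 'P', 'A'] := by
      rw [← List.reverse_reverse st, hrev]; simp
    subst hst
    rw [if_pos ?cond]
    case cond =>
      rw [show (t.reverse ++ ['P','P','A']) ++ ['P'] = t.reverse ++ ['P','P','A','P'] from by simp]
      rw [show (t.reverse ++ ['P','P','A','P']).length - 4 = t.reverse.length from by simp]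
      exact List.drop_left
    · rw [rstep, if_pos ⟨rfl, by rw [List.reverse_append]; simp⟩]
      rw [show ((t.reverse ++ ['P','P','A']).reverse).drop 3 = t from by rw [hrev]; rfl]
      rw [show (t.reverse ++ ['P','P','A']) ++ ['P'] = ((t.reverse ++ ['P']) ++ ['P']) ++ (['A'] ++ ['P']) from by simp]
      rw [show PySem.List.pyRange 0 3 1 = [0, 1, 2] from rfl]
      rw [← List.append_assoc]
      simp only [List.foldl_cons, List.foldl_nil, PySem.List.pop?_last, Option.map_some,
        Option.getD_some]
      simp
  · rw [if_neg ?cond2]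
    case cond2 =>
      intro hdrop
      apply h
      have h4 : 4 ≤ st.length + 1 := by
        by_contra hlt
        have := congrArg List.length hdrop
        simp [List.length_drop] at this
        omega
      have hrev4 : List.take 4 (c :: st.reverse) = ['P','A','P','P'] := by
        have hrd := congrArg List.reverse hdrop
        rw [List.reverse_drop] at hrd
        rw [show (st ++ [c]).reverse = c :: st.reverse from by simp] at hrd
        rw [show (st ++ [c]).length - ((st ++ [c]).length - 4) = 4 from by simp; omega] at hrd
        exact hrd
      rw [List.take_succ_cons] at hrev4
      injection hrev4 with hc' hr
      exact ⟨hc', hr⟩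
    · rw [rstep, if_neg h]
      simp

theorem foldl_pyStep_rev (l : List Char) (st : List Char) :
    l.foldl pyStep st = (revRun st.reverse l).reverse := by
  induction l generalizing st with
  | nil => simp [revRun]
  | cons c t ih =>
    rw [List.foldl_cons, ih, revRun_cons]
    congr 2
    have := congrArg List.reverse (pyStep_rev st c)
    simpa using this

-- on a PPAP-free input the stack never reduces: it is the input itself
theorem revRun_eq_reverse_append (l : List Char) (pre : List Char)
    (h : ¬ (['P','P','A','P'] <:+: pre ++ l)) :
    revRun pre.reverse l = (pre ++ l).reverse := by
  induction l generalizing pre with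
  | nil => simp [revRun]
  | cons c t ih =>
    rw [revRun_cons]
    have hfire : rstep c pre.reverse = c :: pre.reverse := by
      rw [rstep, if_neg]
      rintro ⟨hc, ht⟩
      subst hc
      apply h
      obtain ⟨t', hrev⟩ : ∃ t', pre.reverse = 'A' :: 'P' :: 'P' :: t' := by
        have hsplit := List.take_append_drop 3 pre.reverse
        rw [ht] at hsplit
        exact ⟨pre.reverse.drop 3, hsplit.symm⟩
      have hpre : pre = t'.reverse ++ ['P', 'P', 'A'] := by
        rw [← List.reverse_reverse pre, hrev]; simp
      exact ⟨t'.reverse, t, by rw [hpre]; simp⟩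
    rw [hfire, show c :: pre.reverse = (pre ++ [c]).reverse from by simp]
    rw [ih (pre ++ [c]) (by simpa using h)]
    simp

-- B's loop keeps A's stack unchanged and its fixpoint is PPAP-free
theorem altLoop_spec (s : String) :
    revRun [] (altLoop s).toList = revRun [] s.toList ∧
    ¬ (['P','P','A','P'] <:+: (altLoop s).toList) := by
  induction s using altLoop.induct with
  | case1 s h ih =>
    rw [altLoop, dif_pos h]
    refine ⟨?_, ih.2⟩
    rw [ih.1, replace_toList, revRun_repl]
  | case2 s h =>
    rw [altLoop, dif_neg h]
    exact ⟨rfl, fun hinf => h ((isIn_PPAP_infix s).mpr hinf)⟩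

theorem stack_eq (s : String) :
    (PySem.List.pyRange 0 (PySem.Str.len s) 1).foldl
      (fun stack i => pyStep stack (PySem.List.pyGetD s.toList i ' ')) []
    = (revRun [] s.toList).reverse := by
  rw [PySem.Str.len_eq, ← PySem.List.len_eq]
  rw [PySem.List.foldl_pyRange_pyGetD s.toList ' ' pyStep [] (by norm_num)]
  rw [show (0 : Int).toNat = 0 from rfl, List.drop_zero]
  rw [foldl_pyStep_rev]
  rfl

-- ===== VERDICT (by name: the statement is the Claim_ definition above) =====
theorem solution_spec : Claim_equal_solution := by
  intro s _
  unfold Spec_solution solution solution_alt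
  have hs := altLoop_spec s
  have hstack : (PySem.List.pyRange 0 (PySem.Str.len s) 1).foldl
      (fun stack i => pyStep stack (PySem.List.pyGetD s.toList i ' ')) []
      = (altLoop s).toList := by
    rw [stack_eq, ← hs.1]
    have := revRun_eq_reverse_append (altLoop s).toList [] (by simpa using hs.2)
    simp only [List.reverse_nil, List.nil_append] at this
    rw [this, List.reverse_reverse]
  rw [hstack]
  by_cases hF : altLoop s = "P"
  · rw [if_pos hF, if_pos (Or.inr (by rw [hF]; rfl))]
  · rw [if_neg hF, if_neg]
    rintro (h1 | h2)
    · exact hs.2 (h1 ▸ List.infix_refl _)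
    · exact hF (String.toList_inj.mp (by rw [h2]; rfl))
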